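/- GENERATED by farm/mkstatement.py from design/units.tsv (unit `vorbis_decode_initial.1`) and the assertions of Vorbis/Spec/DecodeInitial.lean — do not edit.
   THE STATEMENT of the proof unit `vorbis_decode_initial.1`: segment 1 of `vorbis_decode_initial` (19 instructions; entries 0x113160;
   exits 0x1131b0; ranges 0x113160-0x1131a6)
   takes each of its entry assertions to one of its exit assertions (`Vorbis.Spec.vorbis_decode_initial.Seg1`), given the contracts of its callees.
   What the names mean: Vorbis/Spec/Basic.lean (the shared hypotheses), Vorbis/Spec/DecodeInitial.lean (the assertions). The theorem to prove:
   `theorem vorbis_decode_initial_1_ok : Vorbis.Spec.vorbis_decode_initial_1.Statement`. -/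
import Vorbis.Spec.DecodeInitial
namespace Vorbis.Spec.vorbis_decode_initial_1
open X86 X86.User Asan

/-- The statement of unit `vorbis_decode_initial.1`. -/
def Statement : Prop :=
  ∀ (Lay : Layout) (_hLay : Lay.hi = 0x1000000) (μ : Microarch) (_hμ : UserX.MicroOK μ) (u₀ : State)
    (_hcode : HasCodeNat Lay u₀ Vorbis.L.vorbis_decode_initial.entry Vorbis.Code.code_vorbis_decode_initial.nat Vorbis.L.vorbis_decode_initial.size)
    (_h_asan_store4_noabort : Asan.SmallCheck Lay μ Vorbis.WayInv (Vorbis.CodeOK u₀) [.rax, .rcx, .rdx] 4 Vorbis.L.__asan_store4_noabort.entry),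
    Vorbis.Spec.vorbis_decode_initial.Seg1 Lay μ u₀

end Vorbis.Spec.vorbis_decode_initial_1
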